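-- pv_equiv track=rewrite | github.com/tannerr12/Data-Structures-and-Algorithms | 3237-alt-and-tab-simulation/3237-alt-and-tab-simulation.py | simulationResult
-- ===== SOURCE A (Python) =====
-- from typing import List
--
-- def simulationResult(windows: List[int], queries: List[int]) -> List[int]:
--
--     seen = set()
--     arr = []
--
--     for i in range(len(queries)-1,-1,-1):
--
--         val = queries[i]
--         if val not in seen:
--             arr.append(val)
--             seen.add(val)
--
--
--
--
--     for i in range(len(windows)):
--         val = windows[i]
--         if val not in seen:
--             arr.append(val)
--
--     return arr
-- ===== SOURCE B (Python) =====
-- def simulationResult(windows, queries):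
--     # index: value -> last index in queries; order = values sorted by descending last index
--     last = {}
--     for i, q in enumerate(queries):
--         last[q] = i
--     order = sorted(last, key=lambda v: -last[v])
--     return order + [w for w in windows if w not in last]
-- ===== Notes on version B (the rewrite author's own statement) =====
-- stated objective: alternative
-- what changed: A dedupes queries in a single reverse pass with a seen-set; B instead builds a dict of each value's last index in one forward pass, sorts the keys by descending last index (last indices are distinct, so this reproduces A's reverse-dedup order exactly), and appends the windows not occurring in queries by a filter.
import Mathlib
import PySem

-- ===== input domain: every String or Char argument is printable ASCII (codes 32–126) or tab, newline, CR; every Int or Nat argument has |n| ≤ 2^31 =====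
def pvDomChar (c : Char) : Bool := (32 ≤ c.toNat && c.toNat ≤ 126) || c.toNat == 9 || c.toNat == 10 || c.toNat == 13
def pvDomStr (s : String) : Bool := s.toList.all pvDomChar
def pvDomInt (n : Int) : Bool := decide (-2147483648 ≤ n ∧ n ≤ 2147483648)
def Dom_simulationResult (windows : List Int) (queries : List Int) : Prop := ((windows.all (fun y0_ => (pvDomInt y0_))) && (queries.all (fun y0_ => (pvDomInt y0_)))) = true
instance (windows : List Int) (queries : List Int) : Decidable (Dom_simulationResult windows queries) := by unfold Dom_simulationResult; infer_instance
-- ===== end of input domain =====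

-- B replaces A's reverse-pass dedup with a last-index dict plus a sort by descending last index; return value only, no mutation. Objective: alternative decomposition (not faster).

-- ===== PORT A =====
def simulationResult (windows : List Int) (queries : List Int) : List Int :=
  -- seen = set(); arr = []; for i in range(len(queries)-1,-1,-1): …
  let st := (PySem.List.pyRange (PySem.List.len queries - 1) (-1) (-1)).foldl
    (fun (st : PySem.Set Int × List Int) i =>
      let val := PySem.List.pyGetD queries i 0
      if PySem.Set.contains st.1 val then st
      else (PySem.Set.add st.1 val, st.2 ++ [val]))
    (PySem.Set.empty, [])
  -- for i in range(len(windows)): …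
  (PySem.List.pyRange 0 (PySem.List.len windows)).foldl
    (fun arr i =>
      let val := PySem.List.pyGetD windows i 0
      if PySem.Set.contains st.1 val then arr else arr ++ [val])
    st.2

-- ===== PORT B =====
def simulationResult_alt (windows : List Int) (queries : List Int) : List Int :=
  -- last = {}; for i, q in enumerate(queries): last[q] = i
  let last := (PySem.List.enumerate queries 0).foldl
    (fun (d : PySem.Dict Int Int) p => d.insert p.2 p.1) PySem.Dict.empty
  -- order = sorted(last, key=lambda v: -last[v])
  let order := PySem.List.sorted (PySem.Dict.keys last) (fun v => -(last.getD v 0))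
  order ++ windows.filter (fun w => !(last.contains w))

-- ===== PRECONDITION & SPEC =====
def Spec_simulationResult (windows : List Int) (queries : List Int) (out : List Int) : Prop := out = simulationResult_alt windows queries
instance (windows : List Int) (queries : List Int) (out : List Int) : Decidable (Spec_simulationResult windows queries out) := by unfold Spec_simulationResult; infer_instance

-- ===== CLAIM (what is proved, stated in full; the proofs are below) =====
def Claim_equal_simulationResult : Prop := ∀ (windows : List Int) (queries : List Int), Dom_simulationResult windows queries → Spec_simulationResult windows queries (simulationResult windows queries)

-- ===== LEMMAS AND PROOFS =====

-- B's last-index dict, standalone (same fold as in simulationResult_alt)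
def pvLastDict (queries : List Int) : PySem.Dict Int Int :=
  (PySem.List.enumerate queries 0).foldl
    (fun (d : PySem.Dict Int Int) p => d.insert p.2 p.1) PySem.Dict.empty

lemma pvLastDict_keys (queries : List Int) :
    (pvLastDict queries).keys = PySem.List.dedup queries := by
  unfold pvLastDict
  rw [PySem.Dict.keys_foldl_insert_key (PySem.List.enumerate queries 0) (·.2) (fun _ p => p.1)
    PySem.Dict.empty]
  simp [PySem.List.map_snd_enumerate, PySem.Set.update,
    PySem.Set.ofList_eq_foldl]

-- the dict really holds each value's LAST index in queries
lemma pvLastDict_getD (queries : List Int) (v : Int) :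
    (pvLastDict queries).getD v 0 =
      if v ∈ queries then (queries.length : Int) - 1 - (queries.reverse.idxOf v : Int) else 0 := by
  induction queries using List.reverseRecOn with
  | nil => simp [pvLastDict]
  | append_singleton qs x ih =>
    unfold pvLastDict at *
    rw [PySem.List.enumerate_append, List.foldl_append]
    simp only [PySem.List.enumerate, List.foldl_cons, List.foldl_nil]
    rw [PySem.Dict.getD_insert]
    by_cases hvx : v = x
    · subst hvx
      simp [List.idxOf_cons_self]
    · rw [if_neg hvx, ih]
      have hidx : ((qs ++ [x]).reverse).idxOf v = qs.reverse.idxOf v + 1 := by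
        simp only [List.reverse_append, List.reverse_singleton, List.singleton_append]
        exact List.idxOf_cons_ne _ (by exact fun h => hvx h.symm)
      by_cases hv : v ∈ qs
      · rw [if_pos hv, if_pos (by simp [hv])]
        rw [hidx]
        simp
        ring
      · rw [if_neg hv, if_neg (by simp [hv, hvx])]

lemma pv_idxOf_append_self (b : Int) (qs : List Int) (h : b ∉ qs) :
    (qs ++ [b]).idxOf b = qs.length := by
  induction qs with
  | nil => simp
  | cons a t ih =>
    simp only [List.mem_cons, not_or] at h
    simp only [List.cons_append, List.idxOf_cons_ne _ (fun he => h.1 he.symm), ih h.2,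
      List.length_cons]

lemma pv_dedup_append_singleton (xs : List Int) (x : Int) :
    PySem.List.dedup (xs ++ [x]) =
      if x ∈ xs then PySem.List.dedup xs else PySem.List.dedup xs ++ [x] := by
  rw [PySem.List.dedup_eq_ofList, PySem.Set.ofList_eq_foldl, List.foldl_append]
  simp only [List.foldl_cons, List.foldl_nil]
  rw [← PySem.Set.ofList_eq_foldl, PySem.List.dedup_eq_ofList]
  by_cases h : x ∈ xs
  · simp [PySem.Set.add, PySem.Set.contains, PySem.Set.mem_ofList, h]
  · simp [PySem.Set.add, PySem.Set.contains, PySem.Set.mem_ofList, h]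

-- dedup keeps first occurrences in order of increasing first-occurrence index
lemma pv_dedup_pairwise_idxOf (xs : List Int) :
    (PySem.List.dedup xs).Pairwise (fun a b => xs.idxOf a < xs.idxOf b) := by
  induction xs using List.reverseRecOn with
  | nil => simp [PySem.List.dedup]
  | append_singleton qs x ih =>
    rw [pv_dedup_append_singleton]
    by_cases h : x ∈ qs
    · rw [if_pos h]
      refine ih.imp_of_mem ?_
      intro a b ha hb hr
      rw [List.idxOf_append_of_mem (by rw [PySem.List.mem_dedup] at ha; exact ha),
          List.idxOf_append_of_mem (by rw [PySem.List.mem_dedup] at hb; exact hb)]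
      exact hr
    · rw [if_neg h, List.pairwise_append]
      refine ⟨ih.imp_of_mem ?_, by simp, ?_⟩
      · intro a b ha hb hr
        rw [List.idxOf_append_of_mem (by rw [PySem.List.mem_dedup] at ha; exact ha),
            List.idxOf_append_of_mem (by rw [PySem.List.mem_dedup] at hb; exact hb)]
        exact hr
      · intro a ha b hb
        simp only [List.mem_singleton] at hb; subst hb
        rw [PySem.List.mem_dedup] at ha
        rw [List.idxOf_append_of_mem ha, pv_idxOf_append_self b qs h]
        exact List.idxOf_lt_length_of_mem ha

-- A's first loop: with seen and arr kept equal, it is exactly Set.update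
lemma pv_loop1 (l : List Int) (s : List Int) :
    l.foldl
      (fun (st : PySem.Set Int × List Int) v =>
        if PySem.Set.contains st.1 v then st
        else (PySem.Set.add st.1 v, st.2 ++ [v]))
      (s, s)
    = (PySem.Set.update s l, PySem.Set.update s l) := by
  induction l generalizing s with
  | nil => simp [PySem.Set.update]
  | cons v l ih =>
    simp only [List.foldl_cons]
    have hmem : PySem.Set.contains s v = true ↔ v ∈ s := by simp [PySem.Set.contains]
    by_cases h : PySem.Set.contains s v
    · rw [if_pos h, ih s]
      have hs : PySem.Set.add s v = s := by simp [PySem.Set.add, hmem.mp h]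
      simp [PySem.Set.update, hs]
    · rw [if_neg h]
      have hadd : PySem.Set.add s v = s ++ [v] := by
        simp [PySem.Set.add]
        intro hv; exact absurd (hmem.mpr hv) h
      rw [hadd, ih (s ++ [v])]
      simp [PySem.Set.update, hadd]

-- the sort of B's keys by descending last index IS the reverse-order dedup of queries
lemma pv_order_eq (queries : List Int) :
    PySem.List.sorted ((pvLastDict queries).keys) (fun v => -((pvLastDict queries).getD v 0))
      = PySem.List.dedup queries.reverse := by
  apply PySem.List.sorted_eq_of_perm_of_pairwise_lt
  · rw [pvLastDict_keys]
    rw [List.perm_ext_iff_of_nodup (PySem.List.nodup_dedup _) (PySem.List.nodup_dedup _)]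
    intro a
    simp
  · refine (pv_dedup_pairwise_idxOf queries.reverse).imp_of_mem ?_
    intro a b ha hb hr
    rw [PySem.List.mem_dedup, List.mem_reverse] at ha hb
    rw [pvLastDict_getD, pvLastDict_getD, if_pos ha, if_pos hb]
    have h1 : (queries.reverse.reverse.idxOf a) = queries.idxOf a := by rw [List.reverse_reverse]
    have h2 : (queries.reverse.reverse.idxOf b) = queries.idxOf b := by rw [List.reverse_reverse]
    omega

lemma pv_updateNil_eq_dedup (l : List Int) :
    PySem.Set.update ([] : List Int) l = PySem.List.dedup l := by
  rw [PySem.List.dedup_eq_ofList, PySem.Set.ofList_eq_foldl]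
  simp [PySem.Set.update]

-- ===== VERDICT (by name: the statement is the Claim_ definition above) =====
theorem simulationResult_spec : Claim_equal_simulationResult := by
  intro windows queries _
  unfold Spec_simulationResult simulationResult simulationResult_alt
  -- A's reverse index loop is a fold over queries.reverse
  have hrange : PySem.List.pyRange (PySem.List.len queries - 1) (-1) (-1)
      = (PySem.List.pyRange 0 (PySem.List.len queries)).reverse := by
    rw [PySem.List.pyRange_neg_one_eq_reverse]
    norm_num
  have hfold : ∀ {β : Type} (f : β → Int → β) (init : β),
      (PySem.List.pyRange 0 (PySem.List.len queries)).reverse.foldl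
        (fun acc j => f acc (PySem.List.pyGetD queries j 0)) init
      = queries.reverse.foldl f init := by
    intro β f init
    conv_rhs => rw [← PySem.List.map_pyGetD_pyRange_zero queries 0]
    rw [← List.map_reverse, List.foldl_map]
  rw [hrange]
  rw [hfold (fun (st : PySem.Set Int × List Int) v =>
        if PySem.Set.contains st.1 v then st
        else (PySem.Set.add st.1 v, st.2 ++ [v])) (PySem.Set.empty, [])]
  have hempty : (PySem.Set.empty : PySem.Set Int) = ([] : List Int) := rfl
  rw [hempty, pv_loop1, pv_updateNil_eq_dedup]
  -- A's second loop is a filter over windows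
  rw [PySem.List.foldl_pyRange_zero_pyGetD windows 0
    (fun arr val => if PySem.Set.contains (PySem.List.dedup queries.reverse) val then arr
      else arr ++ [val])]
  have hbody : (fun (acc : List Int) (val : Int) =>
        if PySem.Set.contains (PySem.List.dedup queries.reverse) val then acc else acc ++ [val])
      = (fun acc val =>
        if (!PySem.Set.contains (PySem.List.dedup queries.reverse) val) = true
        then acc ++ [id val] else acc) := by
    funext acc val
    cases h : PySem.Set.contains (PySem.List.dedup queries.reverse) val
    · simp
    · simp
  rw [hbody, PySem.List.foldl_append_if, List.map_id]
  -- B's pieces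
  show _ = PySem.List.sorted ((pvLastDict queries).keys)
      (fun v => -((pvLastDict queries).getD v 0))
    ++ windows.filter (fun w => !((pvLastDict queries).contains w))
  rw [pv_order_eq]
  congr 1
  apply List.filter_congr
  intro w _
  have hA : (!PySem.Set.contains (PySem.List.dedup queries.reverse) w) = !decide (w ∈ queries) := by
    simp [PySem.Set.contains]
  have hB : (!(pvLastDict queries).contains w) = !decide (w ∈ queries) := by
    by_cases h : w ∈ queries
    · have : (pvLastDict queries).contains w = true := by
        rw [PySem.Dict.contains_iff_mem_keys, pvLastDict_keys, PySem.List.mem_dedup]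
        exact h
      simp [this, h]
    · have : ¬ (pvLastDict queries).contains w = true := by
        rw [PySem.Dict.contains_iff_mem_keys, pvLastDict_keys, PySem.List.mem_dedup]
        exact h
      simp [Bool.not_eq_true] at this
      simp [this, h]
  rw [hA, hB]
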